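-- pv_equiv track=rewrite | github.com/DPelagio/compiladores | nfa.py | popUntilGroupStart
-- ===== SOURCE A (Python) =====
-- PAR_OPEN = '('
--
-- def popUntilGroupStart(ops: list) -> list:
--     out = []
--     while True:
--         op = ops.pop()
--         if op == PAR_OPEN:
--             break
--         out.append(op)
--     return out
-- ===== SOURCE B (Python) =====
-- PAR_OPEN = '('
--
-- def popUntilGroupStart(ops: list) -> list:
--     # Locate the rightmost PAR_OPEN, slice off everything after it (reversed,
--     # to match pop order), and truncate the stack in one step.
--     # Mutates ops like A does (removes the suffix including the marker).
--     i = len(ops) - 1 - ops[::-1].index(PAR_OPEN)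
--     out = ops[i + 1:][::-1]
--     del ops[i:]
--     return out
-- ===== Notes on version B (the rewrite author's own statement) =====
-- stated objective: simpler
-- what changed: Replaces the pop-one-at-a-time loop with a single rightmost-marker search plus one reversed slice and one truncation; Pre_ excludes inputs without the '(' marker, on which A raises IndexError (B raises ValueError).
import Mathlib
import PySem

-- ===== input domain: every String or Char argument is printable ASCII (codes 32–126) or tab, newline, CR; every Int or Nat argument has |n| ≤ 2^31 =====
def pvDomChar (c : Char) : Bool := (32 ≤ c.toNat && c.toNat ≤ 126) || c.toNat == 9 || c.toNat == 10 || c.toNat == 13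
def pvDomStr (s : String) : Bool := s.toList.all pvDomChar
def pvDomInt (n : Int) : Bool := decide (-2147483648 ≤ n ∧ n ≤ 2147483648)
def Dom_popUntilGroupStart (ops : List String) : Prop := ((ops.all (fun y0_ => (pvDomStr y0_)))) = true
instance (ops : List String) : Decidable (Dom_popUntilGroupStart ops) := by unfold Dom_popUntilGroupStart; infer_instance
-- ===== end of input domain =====

-- B replaces A's pop-one-at-a-time loop by a rightmost-marker search, one reversed
-- slice and one truncation (simpler). Equivalence is about the RETURN value; both
-- programs also mutate ops identically (remove the suffix up to and incl. the marker).

-- ===== PORT A =====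
-- the while-True loop: op = ops.pop(); break on '('; else out.append(op)
def popLoopA (ops out : List String) : List String :=
  match h : PySem.List.pop? ops with
  | none => out            -- ops.pop() raises IndexError here; excluded by Pre_
  | some (op, rest) =>
    if op = "(" then out else popLoopA rest (out ++ [op])
termination_by ops.length
decreasing_by
  have := PySem.List.length_of_pop?_eq_some ops h
  simp at this
  omega

def popUntilGroupStart (ops : List String) : List String := popLoopA ops []

-- ===== PORT B =====
def popUntilGroupStart_alt (ops : List String) : List String :=
  match PySem.List.index? ops.reverse "(" with
  | none => []             -- ops[::-1].index raises ValueError here; excluded by Pre_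
  | some j =>
    let i : Int := (ops.length : Int) - 1 - (j : Int)
    (PySem.List.slice ops (some (i + 1)) none).reverse

-- ===== PRECONDITION & SPEC =====
-- A raises IndexError exactly when the marker '(' is absent; those inputs are excluded.
def Pre_popUntilGroupStart (ops : List String) : Prop := "(" ∈ ops
instance (ops : List String) : Decidable (Pre_popUntilGroupStart ops) := by
  unfold Pre_popUntilGroupStart; infer_instance

def pvWitness_popUntilGroupStart : List String := ["a", "(", "b", "c"]

def Spec_popUntilGroupStart (ops : List String) (out : List String) : Prop := out = popUntilGroupStart_alt ops
instance (ops : List String) (out : List String) : Decidable (Spec_popUntilGroupStart ops out) := by unfold Spec_popUntilGroupStart; infer_instance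

-- ===== CLAIM (what is proved, stated in full; the proofs are below) =====
def Claim_equal_popUntilGroupStart : Prop := ∀ (ops : List String), Dom_popUntilGroupStart ops → Pre_popUntilGroupStart ops → Spec_popUntilGroupStart ops (popUntilGroupStart ops)

-- ===== LEMMAS AND PROOFS =====

theorem takeWhile_marker (pre suf : List String) (h : "(" ∉ pre) :
    (pre ++ "(" :: suf).takeWhile (fun x => x ≠ "(") = pre := by
  induction pre with
  | nil => simp
  | cons a t ih =>
    have ha : a ≠ "(" := fun he => h (he ▸ List.mem_cons_self ..)
    have ht : "(" ∉ t := fun hm => h (List.mem_cons_of_mem _ hm)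
    simp only [ne_eq, decide_not] at ih ⊢
    simp [ha, ih ht]

-- A's loop, viewed on the reverse of the stack, collects the prefix before the first '('.
theorem popLoopA_eq (r out : List String) (hmem : "(" ∈ r) :
    popLoopA r.reverse out = out ++ r.takeWhile (fun x => x ≠ "(") := by
  induction r generalizing out with
  | nil => cases hmem
  | cons x t ih =>
    rw [List.reverse_cons]
    rw [popLoopA.eq_def, PySem.List.pop?_last]
    by_cases hx : x = "("
    · subst hx; simp
    · simp only [if_neg hx]
      have hmem' : "(" ∈ t := by
        rcases List.mem_cons.mp hmem with h | h
        · exact absurd h.symm hx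
        · exact h
      rw [ih (out ++ [x]) hmem']
      simp [hx]

theorem popUntilGroupStart_spec : Claim_equal_popUntilGroupStart := by
  intro ops _ hpre
  unfold Spec_popUntilGroupStart popUntilGroupStart popUntilGroupStart_alt
  have hmemr : "(" ∈ ops.reverse := List.mem_reverse.mpr hpre
  obtain ⟨j, hj⟩ := Option.isSome_iff_exists.mp
    ((PySem.List.index?_isSome_iff ops.reverse "(").mpr hmemr)
  rw [hj]
  obtain ⟨pre, suf, hdecomp, hlen, hnotin⟩ :=
    (PySem.List.index?_eq_some_iff ops.reverse "(" j).mp hj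
  -- ops = suf.reverse ++ "(" :: pre.reverse
  have hops : ops = suf.reverse ++ "(" :: pre.reverse := by
    have := congrArg List.reverse hdecomp
    simpa using this
  have hA : popLoopA ops [] = pre := by
    have := popLoopA_eq ops.reverse [] (by simpa using hpre)
    rw [List.reverse_reverse] at this
    rw [this, hdecomp]
    exact takeWhile_marker pre suf hnotin
  -- B's slice index: (len - 1 - j) + 1 = len - j = suf.length + 1 as a Nat
  have hlenops : ops.length = suf.length + 1 + j := by
    have := congrArg List.length hdecomp
    simp at this
    omega
  have hcast : (ops.length : Int) - 1 - (j : Int) + 1 = ((suf.length + 1 : Nat) : Int) := by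
    push_cast; omega
  rw [hA]
  show pre = (PySem.List.slice ops (some ((ops.length : Int) - 1 - (j : Int) + 1)) none).reverse
  rw [hcast, PySem.List.slice_from_natCast, hops]
  rw [show suf.length + 1 = suf.reverse.length + 1 by simp]
  rw [List.drop_append]
  simp
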